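-- pv_equiv track=rewrite | github.com/tihanaujevic/algorithms_in_Bioinformatics | chapter4/BA4E.py | check_cyclo
-- ===== SOURCE A (Python) =====
-- def check_cyclo(spectrum, peptide):
--     parent_mass = max(spectrum)
--     n = len(peptide)
--
--     extended_peptide = peptide + peptide[:-1]
--
--     new_spectrum = [0, sum(peptide)]
--
--     for l in range(n):
--         for k in range(1, n):
--             subpeptide = extended_peptide[l : l + k]
--             new_spectrum.append(sum(subpeptide))
--     new_spectrum = sorted(new_spectrum)
--
--     if sum(peptide) == parent_mass and new_spectrum == spectrum:
--         return True
--
--     return False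
-- ===== SOURCE B (Python) =====
-- def check_cyclo(spectrum, peptide):
--     parent_mass = max(spectrum)
--     n = len(peptide)
--     total = sum(peptide)
--     sums = [0, total]
--     rot = peptide
--     for _ in range(n):
--         acc = 0
--         for x in rot[:-1]:
--             acc += x
--             sums.append(acc)
--         rot = rot[1:] + rot[:1]
--     return sorted(sums) == spectrum and total == parent_mass
-- ===== Notes on version B (the rewrite author's own statement) =====
-- stated objective: faster
-- what changed: B walks each cyclic rotation of the peptide once with a running accumulator, emitting every subpeptide mass in O(1), instead of A's slice-and-sum of the extended peptide for every (start,length) pair.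
import Mathlib
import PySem

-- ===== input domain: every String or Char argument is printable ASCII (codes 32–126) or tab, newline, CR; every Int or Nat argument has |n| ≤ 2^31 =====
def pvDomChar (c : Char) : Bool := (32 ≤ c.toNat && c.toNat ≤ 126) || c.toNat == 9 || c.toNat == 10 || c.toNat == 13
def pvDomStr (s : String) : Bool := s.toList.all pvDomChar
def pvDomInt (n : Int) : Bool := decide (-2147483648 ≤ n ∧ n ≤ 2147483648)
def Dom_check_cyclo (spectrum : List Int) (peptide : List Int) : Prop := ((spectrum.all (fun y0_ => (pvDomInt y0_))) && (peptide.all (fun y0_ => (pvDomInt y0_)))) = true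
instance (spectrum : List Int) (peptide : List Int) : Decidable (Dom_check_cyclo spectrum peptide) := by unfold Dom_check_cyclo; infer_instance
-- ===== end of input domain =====

-- B walks each cyclic rotation once with a running accumulator (no per-subpeptide slice-and-sum); measured faster by the check.

-- ===== PORT A =====
def check_cyclo (spectrum : List Int) (peptide : List Int) : Bool :=
  -- parent_mass = max(spectrum); raises ValueError on empty spectrum: excluded by Pre_
  let parent_mass : Int := (PySem.List.max? spectrum (fun x => x)).getD 0
  let n : Int := PySem.List.len peptide
  let extended_peptide : List Int := peptide ++ PySem.List.slice peptide none (some (-1))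
  let new_spectrum : List Int := [0, peptide.sum]
  let new_spectrum : List Int :=
    (PySem.List.pyRange 0 n 1).foldl (fun acc l =>
      (PySem.List.pyRange 1 n 1).foldl (fun acc k =>
        acc ++ [(PySem.List.slice extended_peptide (some l) (some (l + k))).sum]) acc)
      new_spectrum
  let new_spectrum := PySem.List.sorted new_spectrum (fun x => x) false
  if peptide.sum = parent_mass ∧ new_spectrum = spectrum then true else false

-- ===== PORT B =====
-- Source B's outer counted loop 'for _ in range(n)', carrying the rotating list and the output list
def cycRotLoop (m : Nat) (rot : List Int) (sums : List Int) : List Int :=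
  match m with
  | 0 => sums
  | Nat.succ m' =>
    -- inner: acc = 0; for x in rot[:-1]: acc += x; sums.append(acc)
    let st := (PySem.List.slice rot none (some (-1))).foldl
        (fun (s : Int × List Int) x => (s.1 + x, s.2 ++ [s.1 + x])) (0, sums)
    -- rot = rot[1:] + rot[:1]
    cycRotLoop m' (PySem.List.slice rot (some 1) none ++ PySem.List.slice rot none (some 1)) st.2

def check_cyclo_alt (spectrum : List Int) (peptide : List Int) : Bool :=
  -- parent_mass = max(spectrum); raises ValueError on empty spectrum: excluded by Pre_
  let parent_mass : Int := (PySem.List.max? spectrum (fun x => x)).getD 0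
  let total : Int := peptide.sum
  let sums : List Int := cycRotLoop peptide.length peptide [0, total]
  decide (PySem.List.sorted sums (fun x => x) false = spectrum ∧ total = parent_mass)

-- ===== PRECONDITION & SPEC =====
-- Pre_ excludes only empty spectrum, on which A's max(spectrum) raises ValueError (B raises there too).
def Pre_check_cyclo (spectrum : List Int) (peptide : List Int) : Prop := spectrum ≠ []
instance (spectrum : List Int) (peptide : List Int) : Decidable (Pre_check_cyclo spectrum peptide) := by unfold Pre_check_cyclo; infer_instance
def pvWitness_check_cyclo : List Int × List Int := ([5, 0, 2, 3, 5], [2, 3])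

def Spec_check_cyclo (spectrum : List Int) (peptide : List Int) (out : Bool) : Prop := out = check_cyclo_alt spectrum peptide
instance (spectrum : List Int) (peptide : List Int) (out : Bool) : Decidable (Spec_check_cyclo spectrum peptide out) := by unfold Spec_check_cyclo; infer_instance

-- ===== CLAIM (what is proved, stated in full; the proofs are below) =====
def Claim_equal_check_cyclo : Prop := ∀ (spectrum : List Int) (peptide : List Int), Dom_check_cyclo spectrum peptide → Pre_check_cyclo spectrum peptide → Spec_check_cyclo spectrum peptide (check_cyclo spectrum peptide)

-- ===== LEMMAS AND PROOFS =====

-- the block of masses A appends for one start l (as a map over the inner range)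
def blockA (p : List Int) (l : Int) : List Int :=
  (PySem.List.pyRange 1 (p.length : Int) 1).map (fun k =>
    (PySem.List.slice (p ++ p.dropLast) (some l) (some (l + k))).sum)

-- B's inner fold: running-sum emission = the list of prefix sums of ys
theorem inner_foldl (ys : List Int) (a : Int) (out : List Int) :
    ys.foldl (fun (s : Int × List Int) x => (s.1 + x, s.2 ++ [s.1 + x])) (a, out)
      = (a + ys.sum, out ++ (List.range ys.length).map (fun i => a + (ys.take (i + 1)).sum)) := by
  induction ys generalizing a out with
  | nil => simp
  | cons x t ih =>
    rw [List.foldl_cons, ih (a + x) (out ++ [a + x])]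
    refine Prod.ext ?_ ?_
    · simp; ring
    · simp only [List.length_cons, List.range_succ_eq_map, List.map_cons, List.map_map,
        List.take_succ_cons, List.sum_cons, List.append_assoc]
      simp [Function.comp, add_assoc]

-- one rotation step: rot[1:] + rot[:1] on the l-th rotation gives the (l+1)-th rotation
theorem rot_step (p : List Int) (l : Nat) (hl : l < p.length) :
    PySem.List.slice (p.drop l ++ p.take l) (some 1) none ++
      PySem.List.slice (p.drop l ++ p.take l) none (some 1)
      = p.drop (l + 1) ++ p.take (l + 1) := by
  rw [PySem.List.slice_from_one, PySem.List.slice_to _ (by omega)]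
  have hd : p.drop l = p[l] :: p.drop (l + 1) := List.drop_eq_getElem_cons hl
  have ht : p.take (l + 1) = p.take l ++ [p[l]] := by
    rw [List.take_add_one, List.getElem?_eq_getElem hl]; rfl
  rw [hd, ht]
  simp only [List.cons_append, List.tail_cons, Int.toNat_one, List.take_succ_cons,
    List.take_zero, List.append_assoc]

-- the l-th rotation, truncated, agrees with the extended peptide from l (as far as B reads it)
theorem take_rot (p : List Int) (l j : Nat) (hl : l < p.length) (hj : j ≤ p.length - 1) :
    ((p.drop l ++ p.take l).dropLast).take j = ((p ++ p.dropLast).drop l).take j := by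
  have hlen : (p.drop l ++ p.take l).length = p.length := by simp; omega
  rw [List.dropLast_eq_take, hlen, List.take_take, min_eq_left hj,
      List.drop_append_of_le_length (by omega), List.take_append, List.take_append,
      List.dropLast_eq_take, List.take_take, List.take_take]
  have : min (j - (p.drop l).length) l = min (j - (p.drop l).length) (p.length - 1) := by
    simp only [List.length_drop]; omega
  rw [this]

-- B's loop over the rotations produces exactly A's flatMap of slice-sum blocks
theorem cycRotLoop_eq (p : List Int) (m l : Nat) (h : l + m = p.length) (sums : List Int) :
    cycRotLoop m (p.drop l ++ p.take l) sums
      = sums ++ (PySem.List.pyRange (l : Int) (p.length : Int) 1).flatMap (blockA p) := by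
  induction m generalizing l sums with
  | zero =>
    rw [cycRotLoop, PySem.List.pyRange_one_eq_nil (by omega)]
    simp
  | succ m' ih =>
    have hl : l < p.length := by omega
    rw [cycRotLoop, inner_foldl]
    simp only []
    rw [rot_step p l hl, ih (l + 1) (by omega),
        PySem.List.pyRange_one_cons (a := (l : Int)) (by exact_mod_cast hl), List.flatMap_cons,
        show ((l : Int) + 1) = ((l + 1 : Nat) : Int) by push_cast; ring, List.append_assoc]
    congr 2
    -- the emitted block equals blockA p l
    rw [PySem.List.slice_to_neg_one, blockA, PySem.List.pyRange_one]
    have hlenrot : (p.drop l ++ p.take l).length = p.length := by simp; omega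
    have hlen : ((p.drop l ++ p.take l).dropLast).length = p.length - 1 := by
      rw [List.length_dropLast, hlenrot]
    rw [hlen, show ((p.length : Int) - 1).toNat = p.length - 1 by omega, List.map_map]
    refine List.map_congr_left ?_
    intro i hi
    rw [List.mem_range] at hi
    have h1 : ((l : Int) + (1 + (i : Int))) = ((l + (i + 1) : Nat) : Int) := by push_cast; ring
    simp only [Function.comp, zero_add, h1, PySem.List.slice_natCast]
    rw [take_rot p l (i + 1) hl (by omega)]
    congr 2
    omega

-- ===== VERDICT (by name: the statement is the Claim_ definition above) =====
theorem check_cyclo_spec : Claim_equal_check_cyclo := by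
  intro spectrum peptide _ _
  unfold Spec_check_cyclo check_cyclo check_cyclo_alt
  simp only [PySem.List.foldl_append_singleton_eq_map, PySem.List.foldl_append_eq_flatMap,
    PySem.List.len_eq]
  have hB := cycRotLoop_eq peptide peptide.length 0 (by omega) [0, peptide.sum]
  simp only [List.drop_zero, List.take_zero, List.append_nil, Nat.cast_zero] at hB
  rw [hB]
  unfold blockA
  rw [PySem.List.slice_to_neg_one]
  by_cases h1 : peptide.sum = (PySem.List.max? spectrum (fun x => x)).getD 0
  · by_cases h2 : PySem.List.sorted ([0, peptide.sum] ++
        (PySem.List.pyRange 0 (peptide.length : Int) 1).flatMap (fun l =>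
          (PySem.List.pyRange 1 (peptide.length : Int) 1).map (fun k =>
            (PySem.List.slice (peptide ++ peptide.dropLast) (some l) (some (l + k))).sum)))
        (fun x => x) false = spectrum <;>
      simp [h1, h2]
  · simp [h1]
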